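-- pv_equiv track=rewrite | github.com/mlcommons/logging | mlperf_logging/package_checker/power_checker.py | check_equals
-- ===== SOURCE A (Python) =====
-- def check_equals(l):
--     counter = {}
--     errors = []
--     for e in l:
--         if e in counter:
--             counter[e] += 1
--         else:
--             counter[e] = 1
--     max_equals = max(counter, key = counter.get)
--     for i, e in enumerate(l):
--         if e != max_equals:
--             errors.append(i)
--
--     return len(errors) == 0, errors
-- ===== SOURCE B (Python) =====
-- def check_equals(l):
--     positions = {}
--     for i, e in enumerate(l):
--         positions.setdefault(e, []).append(i)
--     mode = max(positions, key=lambda k: len(positions[k]))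
--     errors = sorted(i for k, idxs in positions.items() if k != mode for i in idxs)
--     return len(errors) == 0, errors
-- ===== Notes on version B (the rewrite author's own statement) =====
-- stated objective: alternative
-- what changed: B replaces A's count-dict plus second full scan by a single grouping pass that maps each value to its index list, takes the mode as the key with the longest index list, and obtains the error indices by sorting the concatenation of the other keys' index lists.
import Mathlib
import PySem

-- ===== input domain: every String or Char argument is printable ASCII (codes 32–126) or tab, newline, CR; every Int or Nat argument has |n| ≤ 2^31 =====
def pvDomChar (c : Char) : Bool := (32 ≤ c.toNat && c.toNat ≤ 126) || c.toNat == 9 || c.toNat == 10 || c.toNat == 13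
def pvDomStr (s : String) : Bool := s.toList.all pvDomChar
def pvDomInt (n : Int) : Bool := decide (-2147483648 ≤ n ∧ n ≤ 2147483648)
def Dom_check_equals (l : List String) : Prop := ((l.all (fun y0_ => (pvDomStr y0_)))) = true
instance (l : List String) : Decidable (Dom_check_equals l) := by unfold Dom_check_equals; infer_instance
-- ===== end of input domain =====

-- B groups indices by value in one pass and sorts the non-mode indices; same return value as A on all non-empty lists.

-- ===== PORT A =====
-- the counting loop: `if e in counter: counter[e] += 1 else: counter[e] = 1`
def pvCounterA (l : List String) : PySem.Dict String Int :=
  l.foldl (fun d e => if d.contains e then d.insert e (d.getD e 0 + 1) else d.insert e 1)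
    PySem.Dict.empty

def check_equals (l : List String) : Bool × List Int :=
  let counter := pvCounterA l
  -- max(counter, key=counter.get); every iterated key is present, so .get is .getD _ 0
  match PySem.List.max? counter.keys (fun k => counter.getD k 0) with
  | none => (true, [])  -- Python raises ValueError here (only for l = []); excluded by Pre_
  | some max_equals =>
      let errors : List Int :=
        (PySem.List.enumerate l).foldl
          (fun acc p => if p.2 ≠ max_equals then acc ++ [p.1] else acc) []
      (errors.length == 0, errors)

-- ===== PORT B =====
-- the grouping loop: positions.setdefault(e, []).append(i)
def pvPositionsB (l : List String) : PySem.Dict String (List Int) :=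
  (PySem.List.enumerate l).foldl
    (fun d p => d.modify p.2 [] (fun xs => xs ++ [p.1])) PySem.Dict.empty

def check_equals_alt (l : List String) : Bool × List Int :=
  let positions := pvPositionsB l
  match PySem.List.max? positions.keys (fun k => (positions.getD k []).length) with
  | none => (true, [])  -- Python raises ValueError here (only for l = []); excluded by Pre_
  | some mode =>
      let errors : List Int :=
        PySem.List.sorted
          ((positions.items.filter (fun kv => kv.1 ≠ mode)).flatMap (fun kv => kv.2))
          (fun i => i)
      (errors.length == 0, errors)

-- ===== PRECONDITION & SPEC =====
-- Pre_ excludes only l = [], where the Python A raises ValueError (max() of an empty dict).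
def Pre_check_equals (l : List String) : Prop := l ≠ []
instance (l : List String) : Decidable (Pre_check_equals l) := by unfold Pre_check_equals; infer_instance
def pvWitness_check_equals : List String := ["a", "b", "a"]
def Spec_check_equals (l : List String) (out : Bool × List Int) : Prop := out = check_equals_alt l
instance (l : List String) (out : Bool × List Int) : Decidable (Spec_check_equals l out) := by unfold Spec_check_equals; infer_instance

-- ===== CLAIM (what is proved, stated in full; the proofs are below) =====
def Claim_equal_check_equals : Prop := ∀ (l : List String), Dom_check_equals l → Pre_check_equals l → Spec_check_equals l (check_equals l)

-- ===== LEMMAS AND PROOFS =====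

-- the element-indexed view of enumerate(l): (value, index) pairs
def pvLp (l : List String) : List (String × Int) :=
  (PySem.List.enumerate l).map (fun p => (p.2, p.1))

lemma pvCounterA_fn_eq :
    (fun (d : PySem.Dict String Int) e =>
        if d.contains e then d.insert e (d.getD e 0 + 1) else d.insert e 1)
      = fun d e => d.insert e (d.getD e 0 + 1) := by
  funext d e
  by_cases h : d.contains e = true
  · simp [h]
  · simp only [Bool.not_eq_true] at h
    rw [if_neg (by simp [h]), PySem.Dict.getD_of_not_contains d 0 h]
    norm_num

lemma pvCounterA_getD (l : List String) (k : String) :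
    (pvCounterA l).getD k 0 = (l.count k : Int) := by
  unfold pvCounterA
  rw [pvCounterA_fn_eq, PySem.Dict.getD_foldl_insert_add_one]
  simp

lemma pvCounterA_keys (l : List String) :
    (pvCounterA l).keys = PySem.Set.ofList l := by
  unfold pvCounterA
  rw [pvCounterA_fn_eq, PySem.Dict.keys_foldl_insert]
  rfl

lemma pvPositionsB_eq (l : List String) :
    pvPositionsB l
      = (pvLp l).foldl (fun d p => d.modify p.1 [] (fun xs => xs ++ [p.2])) PySem.Dict.empty := by
  unfold pvPositionsB pvLp
  rw [List.foldl_map]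

lemma pvPositionsB_getD (l : List String) (c : String) :
    (pvPositionsB l).getD c []
      = ((pvLp l).filter (fun p => p.1 == c)).map (fun x => x.2) := by
  rw [pvPositionsB_eq, PySem.Dict.getD_foldl_modify_append]
  simp

lemma pvPositionsB_keys (l : List String) :
    (pvPositionsB l).keys = PySem.Set.ofList l := by
  have h := PySem.Dict.keys_foldl_modify_key (PySem.List.enumerate l)
      (fun p : Int × String => p.2) ([] : List Int)
      (fun _ p xs => xs ++ [p.1]) (PySem.Dict.empty : PySem.Dict String (List Int))
  rw [show (pvPositionsB l).keys
        = PySem.Set.update (PySem.Dict.empty : PySem.Dict String (List Int)).keys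
            ((PySem.List.enumerate l).map fun p => p.2) from h]
  rw [PySem.List.map_snd_enumerate]
  rfl

lemma pvPositionsB_nodup (l : List String) : (pvPositionsB l).keys.Nodup :=
  PySem.Dict.nodup_keys_foldl_modify_key (PySem.List.enumerate l)
    (fun p : Int × String => p.2) ([] : List Int) (fun _ p xs => xs ++ [p.1])
    (PySem.Dict.empty : PySem.Dict String (List Int))
    (by rw [PySem.Dict.keys_empty]; exact List.nodup_nil)

lemma pvEnum_filter_length (k : String) :
    ∀ (l : List String) (s : Int),
      (((PySem.List.enumerate l s).map (fun p => (p.2, p.1))).filter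
          (fun p => p.1 == k)).length = l.count k
  | [], _ => by simp
  | x :: t, s => by
    rw [PySem.List.enumerate_cons]
    by_cases hx : x = k
    · simp [hx, pvEnum_filter_length k t (s + 1)]
    · simp [hx, pvEnum_filter_length k t (s + 1)]

lemma pvLp_filter_length (l : List String) (k : String) :
    ((pvLp l).filter (fun p => p.1 == k)).length = l.count k :=
  pvEnum_filter_length k l 0

def pvStepI {α : Type} (k1 : α → Int) (acc : Option α) (x : α) : Option α :=
  match acc with
  | none => some x
  | some m => if k1 m < k1 x then some x else some m

def pvStepN {α : Type} (k2 : α → Nat) (acc : Option α) (x : α) : Option α :=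
  match acc with
  | none => some x
  | some m => if k2 m < k2 x then some x else some m

lemma pvMax?_congr_aux {α : Type} (k1 : α → Int) (k2 : α → Nat) :
    ∀ (xs : List α) (acc : Option α), (∀ x ∈ xs, k1 x = (k2 x : Int)) →
      (∀ x, acc = some x → k1 x = (k2 x : Int)) →
      List.foldl (pvStepI k1) acc xs = List.foldl (pvStepN k2) acc xs
  | [], _, _, _ => rfl
  | a :: t, acc, h, hacc => by
    have ha : k1 a = (k2 a : Int) := h a (by simp)
    have ht : ∀ x ∈ t, k1 x = (k2 x : Int) := fun x hx => h x (List.mem_cons_of_mem _ hx)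
    cases acc with
    | none =>
        simp only [List.foldl_cons, pvStepI, pvStepN]
        exact pvMax?_congr_aux k1 k2 t (some a) ht (fun x hx => by cases hx; exact ha)
    | some m =>
        have hm : k1 m = (k2 m : Int) := hacc m rfl
        have hiff : k1 m < k1 a ↔ k2 m < k2 a := by rw [hm, ha]; exact_mod_cast Iff.rfl
        simp only [List.foldl_cons, pvStepI, pvStepN]
        by_cases hlt : k1 m < k1 a
        · rw [if_pos hlt, if_pos (hiff.mp hlt)]
          exact pvMax?_congr_aux k1 k2 t (some a) ht (fun x hx => by cases hx; exact ha)
        · rw [if_neg hlt, if_neg (fun hc => hlt (hiff.mpr hc))]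
          exact pvMax?_congr_aux k1 k2 t (some m) ht (fun x hx => by cases hx; exact hm)

lemma pvMax?_key_congr {α : Type} (xs : List α) (k1 : α → Int) (k2 : α → Nat)
    (h : ∀ x ∈ xs, k1 x = (k2 x : Int)) :
    PySem.List.max? xs k1 = PySem.List.max? xs k2 := by
  unfold PySem.List.max?
  exact pvMax?_congr_aux k1 k2 xs none h (fun x hx => by cases hx)

lemma pvFilter_or_perm {α : Type} (a b : α → Bool) :
    ∀ (L : List α), (∀ x ∈ L, ¬(a x = true ∧ b x = true)) →
      (L.filter (fun x => a x || b x)).Perm (L.filter a ++ L.filter b)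
  | [], _ => by simp
  | x :: L, h => by
    have ih := pvFilter_or_perm a b L (fun y hy => h y (List.mem_cons_of_mem _ hy))
    by_cases hax : a x = true
    · have hbx : ¬ b x = true := fun hb => h x (List.mem_cons_self) ⟨hax, hb⟩
      simp only [List.filter_cons, hax, Bool.true_or, if_pos, Bool.not_eq_true] at *
      simpa [hax, hbx] using ih.cons x
    · by_cases hbx : b x = true
      · have h1 : (List.filter (fun x => a x || b x) (x :: L)).Perm
            (x :: (L.filter a ++ L.filter b)) := by
          simpa [hax, hbx] using ih.cons x
        have h2 : (L.filter a ++ x :: L.filter b).Perm (x :: (L.filter a ++ L.filter b)) :=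
          List.perm_middle
        have h3 : (x :: L).filter a ++ (x :: L).filter b
            = L.filter a ++ x :: L.filter b := by
          simp [List.filter_cons, hax, hbx]
        rw [h3]
        exact h1.trans h2.symm
      · simpa [hax, hbx] using ih

lemma pvFlatMap_filter_perm {β : Type} (q : String → Bool) (L : List (String × β)) :
    ∀ (K : List String), K.Nodup →
      ((K.filter q).flatMap (fun k => L.filter (fun p => p.1 == k))).Perm
        (L.filter (fun p => q p.1 && decide (p.1 ∈ K)))
  | [], _ => by simp
  | k :: K, hnd => by
    have hk : k ∉ K := (List.nodup_cons.mp hnd).1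
    have ih := pvFlatMap_filter_perm q L K (List.nodup_cons.mp hnd).2
    by_cases hq : q k = true
    · have hcong : L.filter (fun p => q p.1 && decide (p.1 ∈ k :: K))
          = L.filter (fun p => (p.1 == k) || (q p.1 && decide (p.1 ∈ K))) := by
        apply List.filter_congr
        intro p _
        by_cases hpk : p.1 = k
        · simp [hpk, hq]
        · simp [hpk, List.mem_cons]
      have hdisj : ∀ p ∈ L, ¬((p.1 == k) = true ∧ (q p.1 && decide (p.1 ∈ K)) = true) := by
        intro p _ ⟨h1, h2⟩
        have : p.1 = k := by simpa using h1
        have : k ∈ K := by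
          subst this
          simp only [Bool.and_eq_true, decide_eq_true_eq] at h2
          exact h2.2
        exact hk this
      rw [hcong]
      have hfl : (List.filter q (k :: K)).flatMap (fun k => L.filter (fun p => p.1 == k))
          = L.filter (fun p => p.1 == k)
            ++ (K.filter q).flatMap (fun k => L.filter (fun p => p.1 == k)) := by
        simp [hq]
      rw [hfl]
      exact (List.Perm.append_left _ ih).trans (pvFilter_or_perm _ _ L hdisj).symm
    · have hcong : L.filter (fun p => q p.1 && decide (p.1 ∈ k :: K))
          = L.filter (fun p => q p.1 && decide (p.1 ∈ K)) := by
        apply List.filter_congr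
        intro p _
        by_cases hpk : p.1 = k
        · rw [hpk]; simp [hq]
        · simp [hpk, List.mem_cons]
      have hfl : List.filter q (k :: K) = List.filter q K := by
        simp [hq]
      rw [hcong, hfl]
      exact ih

-- A's error loop, as filter-map of enumerate
lemma pvErrorsA_eq (l : List String) (m : String) :
    (PySem.List.enumerate l).foldl
        (fun acc p => if p.2 ≠ m then acc ++ [p.1] else acc) ([] : List Int)
      = ((PySem.List.enumerate l).filter (fun p => decide (p.2 ≠ m))).map (fun p => p.1) := by
  have hfn : (fun (acc : List Int) (p : Int × String) => if p.2 ≠ m then acc ++ [p.1] else acc)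
      = (fun acc p => if (fun p : Int × String => decide (p.2 ≠ m)) p = true
          then acc ++ [p.1] else acc) := by
    funext acc p
    by_cases h : p.2 = m <;> simp [h]
  rw [hfn, PySem.List.foldl_append_if]
  simp

-- B's gathered index lists are a permutation of A's error list
lemma pvErrors_perm (l : List String) (m : String) :
    (((PySem.List.enumerate l).filter (fun p => decide (p.2 ≠ m))).map (fun p => p.1)).Perm
      (((pvPositionsB l).items.filter (fun kv => decide (kv.1 ≠ m))).flatMap (fun kv => kv.2)) := by
  have hitems := PySem.Dict.items_eq_map_keys (pvPositionsB l) (pvPositionsB_nodup l) ([] : List Int)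
  rw [hitems, pvPositionsB_keys, List.filter_map]
  have hcomp : ((fun kv : String × List Int => decide (kv.1 ≠ m))
      ∘ fun k => (k, (pvPositionsB l).getD k [])) = fun k => decide (k ≠ m) := rfl
  rw [hcomp, List.flatMap_map]
  have hbody : (fun k => (pvPositionsB l).getD k [])
      = fun k => ((pvLp l).filter (fun p => p.1 == k)).map (fun x => x.2) := by
    funext k; exact pvPositionsB_getD l k
  simp only [hbody]
  -- pull the map out of the flatMap
  rw [show ((PySem.Set.ofList l).filter (fun k => decide (k ≠ m))).flatMap
        (fun k => ((pvLp l).filter (fun p => p.1 == k)).map (fun x => x.2))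
      = (((PySem.Set.ofList l).filter (fun k => decide (k ≠ m))).flatMap
        (fun k => (pvLp l).filter (fun p => p.1 == k))).map (fun x => x.2) from by
    rw [List.map_flatMap]]
  have hperm := pvFlatMap_filter_perm (fun k => decide (k ≠ m)) (pvLp l)
      (PySem.Set.ofList l) (PySem.Set.nodup_ofList l)
  have hmem : ∀ p ∈ pvLp l, p.1 ∈ PySem.Set.ofList l := by
    intro p hp
    rw [PySem.Set.mem_ofList]
    unfold pvLp at hp
    rcases List.mem_map.mp hp with ⟨q, hq, rfl⟩
    have : q.2 ∈ (PySem.List.enumerate l).map (fun p => p.2) := List.mem_map_of_mem hq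
    rwa [PySem.List.map_snd_enumerate] at this
  have hcong2 : (pvLp l).filter (fun p => decide (p.1 ≠ m) && decide (p.1 ∈ PySem.Set.ofList l))
      = (pvLp l).filter (fun p => decide (p.1 ≠ m)) := by
    apply List.filter_congr
    intro p hp
    simp [hmem p hp]
  rw [hcong2] at hperm
  -- A's error list equals map snd of the fst-filtered pvLp
  have hA : ((PySem.List.enumerate l).filter (fun p => decide (p.2 ≠ m))).map (fun p => p.1)
      = ((pvLp l).filter (fun p => decide (p.1 ≠ m))).map (fun x => x.2) := by
    unfold pvLp
    rw [List.filter_map]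
    rw [show ((fun p : String × Int => decide (p.1 ≠ m)) ∘ fun p : Int × String => (p.2, p.1))
        = fun p : Int × String => decide (p.2 ≠ m) from rfl]
    rw [List.map_map]
    rfl
  rw [hA]
  exact (hperm.map (fun x => x.2)).symm

lemma pvErrorsA_pairwise (l : List String) (m : String) :
    (((PySem.List.enumerate l).filter (fun p => decide (p.2 ≠ m))).map (fun p => p.1)).Pairwise
      (fun a b : Int => a < b) := by
  apply List.pairwise_map.mpr
  exact ((PySem.List.pairwise_lt_enumerate l 0).sublist List.filter_sublist)

-- ===== VERDICT (by name: the statement is the Claim_ definition above) =====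
theorem check_equals_spec : Claim_equal_check_equals := by
  intro l _ hpre
  unfold Spec_check_equals check_equals check_equals_alt
  show (match PySem.List.max? (pvCounterA l).keys (fun k => (pvCounterA l).getD k 0) with
      | none => ((true : Bool), ([] : List Int))
      | some max_equals =>
          (((PySem.List.enumerate l).foldl
              (fun acc (p : Int × String) => if p.2 ≠ max_equals then acc ++ [p.1] else acc) ([] : List Int)).length == 0,
            (PySem.List.enumerate l).foldl
              (fun acc (p : Int × String) => if p.2 ≠ max_equals then acc ++ [p.1] else acc) ([] : List Int)))
    = (match PySem.List.max? (pvPositionsB l).keys (fun k => ((pvPositionsB l).getD k []).length) with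
      | none => ((true : Bool), ([] : List Int))
      | some mode =>
          ((PySem.List.sorted
              (((pvPositionsB l).items.filter (fun (kv : String × List Int) => kv.1 ≠ mode)).flatMap (fun kv => kv.2))
              (fun i => i)).length == 0,
            PySem.List.sorted
              (((pvPositionsB l).items.filter (fun (kv : String × List Int) => kv.1 ≠ mode)).flatMap (fun kv => kv.2))
              (fun i => i)))
  have hkey : ∀ k ∈ PySem.Set.ofList l,
      (pvCounterA l).getD k 0 = (((pvPositionsB l).getD k []).length : Int) := by
    intro k _
    rw [pvCounterA_getD, pvPositionsB_getD, List.length_map, pvLp_filter_length]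
  have hmax : PySem.List.max? (pvCounterA l).keys (fun k => (pvCounterA l).getD k 0)
      = PySem.List.max? (pvPositionsB l).keys (fun k => ((pvPositionsB l).getD k []).length) := by
    rw [pvCounterA_keys, pvPositionsB_keys]
    exact pvMax?_key_congr _ _ _ hkey
  rw [hmax]
  cases hm : PySem.List.max? (pvPositionsB l).keys (fun k => ((pvPositionsB l).getD k []).length) with
  | none =>
      exfalso
      rw [PySem.List.max?_eq_none_iff, pvPositionsB_keys] at hm
      rcases List.exists_mem_of_ne_nil l hpre with ⟨e, he⟩
      have hmem : e ∈ PySem.Set.ofList l := (PySem.Set.mem_ofList l e).mpr he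
      rw [hm] at hmem
      exact List.not_mem_nil hmem
  | some m =>
      have herr : (PySem.List.enumerate l).foldl
            (fun acc p => if p.2 ≠ m then acc ++ [p.1] else acc) ([] : List Int)
          = PySem.List.sorted
              (((pvPositionsB l).items.filter (fun kv => kv.1 ≠ m)).flatMap (fun kv => kv.2))
              (fun i => i) := by
        rw [pvErrorsA_eq]
        exact (PySem.List.sorted_eq_of_perm_of_pairwise_lt _ _ _
          (pvErrors_perm l m) (pvErrorsA_pairwise l m)).symm
      dsimp only
      rw [herr]
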